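-- pv_equiv track=rewrite | github.com/Sam-Max/plugin.video.jacktook | lib/utils/general_utils.py | filter_by_quality
-- ===== SOURCE A (Python) =====
-- def filter_by_quality(results):
--     quality_720p = []
--     quality_1080p = []
--     quality_4k = []
--     no_quarlity = []
--
--     for res in results:
--         title = res["title"]
--         if "480p" in title:
--             res["qualityTitle"] = "[B][COLOR orange]480p - [/COLOR][/B]" + res["title"]
--             res["Quality"] = "480p"
--             quality_720p.append(res)
--         elif "720p" in title:
--             res["qualityTitle"] = "[B][COLOR orange]720p - [/COLOR][/B]" + res["title"]
--             res["Quality"] = "720p"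
--             quality_720p.append(res)
--         elif "1080p" in title:
--             res["qualityTitle"] = "[B][COLOR blue]1080p - [/COLOR][/B]" + res["title"]
--             res["Quality"] = "1080p"
--             quality_1080p.append(res)
--         elif "2160" in title:
--             res["qualityTitle"] = "[B][COLOR yellow]4k - [/COLOR][/B]" + res["title"]
--             res["Quality"] = "4k"
--             quality_4k.append(res)
--         else:
--             res["qualityTitle"] = "[B][COLOR yellow]N/A - [/COLOR][/B]" + res["title"]
--             res["Quality"] = "N/A"
--             no_quarlity.append(res)
--
--     combined_list = quality_4k + quality_1080p + quality_720p + no_quarlity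
--     return combined_list
-- ===== SOURCE B (Python) =====
-- _QUALITY_TABLE = [
--     ("480p", "480p", "orange", 2),
--     ("720p", "720p", "orange", 2),
--     ("1080p", "1080p", "blue", 1),
--     ("2160", "4k", "yellow", 0),
-- ]
--
--
-- def _tag(res):
--     title = res["title"]
--     for pattern, label, color, rank in _QUALITY_TABLE:
--         if pattern in title:
--             res["qualityTitle"] = "[B][COLOR %s]%s - [/COLOR][/B]" % (color, label) + title
--             res["Quality"] = label
--             return rank
--     res["qualityTitle"] = "[B][COLOR yellow]N/A - [/COLOR][/B]" + title
--     res["Quality"] = "N/A"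
--     return 3
--
--
-- def filter_by_quality(results):
--     # tag every result once (same in-place mutation as before), then let a
--     # stable sort by the priority rank reproduce the bucket order
--     return sorted(results, key=_tag)
-- ===== Notes on version B (the rewrite author's own statement) =====
-- stated objective: alternative
-- what changed: A table-driven single tagging pass plus a stable sort by a priority rank (4k=0, 1080p=1, 720p/480p=2, N/A=3) replaces the if/elif chain that appends into four separate bucket lists and concatenates them.
import Mathlib
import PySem

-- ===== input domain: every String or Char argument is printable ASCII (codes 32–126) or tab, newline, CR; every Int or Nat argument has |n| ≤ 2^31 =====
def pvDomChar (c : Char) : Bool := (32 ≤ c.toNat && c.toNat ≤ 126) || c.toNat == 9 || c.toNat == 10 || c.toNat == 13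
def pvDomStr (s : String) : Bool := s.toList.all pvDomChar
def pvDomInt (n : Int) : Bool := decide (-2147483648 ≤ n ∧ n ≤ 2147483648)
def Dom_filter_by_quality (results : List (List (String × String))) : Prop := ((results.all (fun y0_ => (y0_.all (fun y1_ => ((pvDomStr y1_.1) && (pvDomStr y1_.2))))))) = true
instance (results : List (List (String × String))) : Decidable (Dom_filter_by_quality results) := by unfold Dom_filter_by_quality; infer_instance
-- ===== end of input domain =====

-- B replaces A's four quality buckets by one tagging pass and a stable sort on a priority
-- rank (alternative decomposition, not faster); both programs mutate the result dicts in
-- place in the same way, and the equivalence proved here is about the return value.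

-- ===== PORT A =====
def filter_by_quality (results : List (List (String × String))) : List (List (String × String)) :=
  let st := results.foldl
    (fun (st : List (List (String × String)) × List (List (String × String)) ×
               List (List (String × String)) × List (List (String × String))) res =>
      let (q720, q1080, q4k, na) := st
      let d := PySem.Dict.mk res
      let title := d.getD "title" ""   -- Python raises KeyError when "title" is absent; Pre_ excludes that
      if PySem.Str.isIn "480p" title then
        let d := (d.insert "qualityTitle" ("[B][COLOR orange]480p - [/COLOR][/B]" ++ title)).insert "Quality" "480p"
        (q720 ++ [d.items], q1080, q4k, na)
      else if PySem.Str.isIn "720p" title then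
        let d := (d.insert "qualityTitle" ("[B][COLOR orange]720p - [/COLOR][/B]" ++ title)).insert "Quality" "720p"
        (q720 ++ [d.items], q1080, q4k, na)
      else if PySem.Str.isIn "1080p" title then
        let d := (d.insert "qualityTitle" ("[B][COLOR blue]1080p - [/COLOR][/B]" ++ title)).insert "Quality" "1080p"
        (q720, q1080 ++ [d.items], q4k, na)
      else if PySem.Str.isIn "2160" title then
        let d := (d.insert "qualityTitle" ("[B][COLOR yellow]4k - [/COLOR][/B]" ++ title)).insert "Quality" "4k"
        (q720, q1080, q4k ++ [d.items], na)
      else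
        let d := (d.insert "qualityTitle" ("[B][COLOR yellow]N/A - [/COLOR][/B]" ++ title)).insert "Quality" "N/A"
        (q720, q1080, q4k, na ++ [d.items]))
    ([], [], [], [])
  let (q720, q1080, q4k, na) := st
  q4k ++ q1080 ++ q720 ++ na

-- ===== PORT B =====
def pvQualityTable : List (String × String × String × Nat) :=
  [("480p", "480p", "orange", 2), ("720p", "720p", "orange", 2),
   ("1080p", "1080p", "blue", 1), ("2160", "4k", "yellow", 0)]

-- the `for pattern, label, color, rank in _QUALITY_TABLE` loop of Source B's _tag
-- ("%" formatting of the constant pattern is ported, exactly, as concatenation)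
def pvTagLoop (d : PySem.Dict String String) (title : String) :
    List (String × String × String × Nat) → PySem.Dict String String × Nat
  | [] => ((d.insert "qualityTitle" ("[B][COLOR yellow]N/A - [/COLOR][/B]" ++ title)).insert "Quality" "N/A", 3)
  | (pattern, label, color, rank) :: rest =>
    if PySem.Str.isIn pattern title then
      ((d.insert "qualityTitle" ("[B][COLOR " ++ color ++ "]" ++ label ++ " - [/COLOR][/B]" ++ title)).insert "Quality" label, rank)
    else pvTagLoop d title rest

def pvTagB (res : List (String × String)) : List (String × String) × Nat :=
  let d := PySem.Dict.mk res
  let r := pvTagLoop d (d.getD "title" "") pvQualityTable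
  (r.1.items, r.2)

def filter_by_quality_alt (results : List (List (String × String))) : List (List (String × String)) :=
  -- sorted(results, key=_tag): the key is computed once per element (mutating it),
  -- then the stable sort orders the mutated dicts by their rank
  let pairs := results.map pvTagB
  (PySem.List.sorted pairs (fun p => p.2)).map Prod.fst

-- ===== PRECONDITION & SPEC =====
-- Pre_ excludes result dicts without a "title" key, on which A raises KeyError, and
-- association lists with duplicate keys, which do not represent any Python dict input.
def Pre_filter_by_quality (results : List (List (String × String))) : Prop :=
  ∀ res ∈ results, (res.any (fun p => p.1 == "title")) = true ∧ (res.map Prod.fst).Nodup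
instance (results : List (List (String × String))) : Decidable (Pre_filter_by_quality results) := by
  unfold Pre_filter_by_quality; infer_instance

def pvWitness_filter_by_quality : (List (List (String × String))) :=
  [[("title", "Movie 2160 UHD")], [("title", "clip 720p")], [("title", "other")]]

def Spec_filter_by_quality (results : List (List (String × String))) (out : List (List (String × String))) : Prop := out = filter_by_quality_alt results
instance (results : List (List (String × String))) (out : List (List (String × String))) : Decidable (Spec_filter_by_quality results out) := by unfold Spec_filter_by_quality; infer_instance

-- ===== CLAIM (what is proved, stated in full; the proofs are below) =====
def Claim_equal_filter_by_quality : Prop := ∀ (results : List (List (String × String))), Dom_filter_by_quality results → Pre_filter_by_quality results → Spec_filter_by_quality results (filter_by_quality results)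

-- ===== LEMMAS AND PROOFS =====

theorem pvWitness_ok :
    Dom_filter_by_quality pvWitness_filter_by_quality ∧ Pre_filter_by_quality pvWitness_filter_by_quality := by
  constructor
  · decide
  · decide

-- per-result characterisation of B's table loop, one lemma per branch of A's chain
theorem tag_480 (d : PySem.Dict String String) (title : String)
    (h : PySem.Str.isIn "480p" title = true) :
    pvTagLoop d title pvQualityTable =
      ((d.insert "qualityTitle" ("[B][COLOR orange]480p - [/COLOR][/B]" ++ title)).insert "Quality" "480p", 2) := by
  simp only [pvQualityTable, pvTagLoop, h]
  simp

theorem tag_720 (d : PySem.Dict String String) (title : String)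
    (h0 : PySem.Str.isIn "480p" title = false) (h : PySem.Str.isIn "720p" title = true) :
    pvTagLoop d title pvQualityTable =
      ((d.insert "qualityTitle" ("[B][COLOR orange]720p - [/COLOR][/B]" ++ title)).insert "Quality" "720p", 2) := by
  simp only [pvQualityTable, pvTagLoop, h0, h]
  simp

theorem tag_1080 (d : PySem.Dict String String) (title : String)
    (h0 : PySem.Str.isIn "480p" title = false) (h1 : PySem.Str.isIn "720p" title = false)
    (h : PySem.Str.isIn "1080p" title = true) :
    pvTagLoop d title pvQualityTable =
      ((d.insert "qualityTitle" ("[B][COLOR blue]1080p - [/COLOR][/B]" ++ title)).insert "Quality" "1080p", 1) := by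
  simp only [pvQualityTable, pvTagLoop, h0, h1, h]
  simp

theorem tag_2160 (d : PySem.Dict String String) (title : String)
    (h0 : PySem.Str.isIn "480p" title = false) (h1 : PySem.Str.isIn "720p" title = false)
    (h2 : PySem.Str.isIn "1080p" title = false) (h : PySem.Str.isIn "2160" title = true) :
    pvTagLoop d title pvQualityTable =
      ((d.insert "qualityTitle" ("[B][COLOR yellow]4k - [/COLOR][/B]" ++ title)).insert "Quality" "4k", 0) := by
  simp only [pvQualityTable, pvTagLoop, h0, h1, h2, h]
  simp

theorem tag_na (d : PySem.Dict String String) (title : String)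
    (h0 : PySem.Str.isIn "480p" title = false) (h1 : PySem.Str.isIn "720p" title = false)
    (h2 : PySem.Str.isIn "1080p" title = false) (h3 : PySem.Str.isIn "2160" title = false) :
    pvTagLoop d title pvQualityTable =
      ((d.insert "qualityTitle" ("[B][COLOR yellow]N/A - [/COLOR][/B]" ++ title)).insert "Quality" "N/A", 3) := by
  simp only [pvQualityTable, pvTagLoop, h0, h1, h2, h3]
  simp

theorem rank_le_three (res : List (String × String)) : (pvTagB res).2 ≤ 3 := by
  unfold pvTagB
  simp only [pvQualityTable, pvTagLoop]
  split_ifs <;> simp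

-- A's loop, run from arbitrary buckets, appends exactly B's rank-filtered tagged results
theorem loopA (l : List (List (String × String)))
    (q720 q1080 q4k na : List (List (String × String))) :
    l.foldl
      (fun (st : List (List (String × String)) × List (List (String × String)) ×
                 List (List (String × String)) × List (List (String × String))) res =>
        let (q720, q1080, q4k, na) := st
        let d := PySem.Dict.mk res
        let title := d.getD "title" ""
        if PySem.Str.isIn "480p" title then
          let d := (d.insert "qualityTitle" ("[B][COLOR orange]480p - [/COLOR][/B]" ++ title)).insert "Quality" "480p"
          (q720 ++ [d.items], q1080, q4k, na)
        else if PySem.Str.isIn "720p" title then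
          let d := (d.insert "qualityTitle" ("[B][COLOR orange]720p - [/COLOR][/B]" ++ title)).insert "Quality" "720p"
          (q720 ++ [d.items], q1080, q4k, na)
        else if PySem.Str.isIn "1080p" title then
          let d := (d.insert "qualityTitle" ("[B][COLOR blue]1080p - [/COLOR][/B]" ++ title)).insert "Quality" "1080p"
          (q720, q1080 ++ [d.items], q4k, na)
        else if PySem.Str.isIn "2160" title then
          let d := (d.insert "qualityTitle" ("[B][COLOR yellow]4k - [/COLOR][/B]" ++ title)).insert "Quality" "4k"
          (q720, q1080, q4k ++ [d.items], na)
        else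
          let d := (d.insert "qualityTitle" ("[B][COLOR yellow]N/A - [/COLOR][/B]" ++ title)).insert "Quality" "N/A"
          (q720, q1080, q4k, na ++ [d.items]))
      (q720, q1080, q4k, na) =
    (q720 ++ (((l.map pvTagB).filter (fun p => p.2 == 2)).map Prod.fst),
     q1080 ++ (((l.map pvTagB).filter (fun p => p.2 == 1)).map Prod.fst),
     q4k ++ (((l.map pvTagB).filter (fun p => p.2 == 0)).map Prod.fst),
     na ++ (((l.map pvTagB).filter (fun p => p.2 == 3)).map Prod.fst)) := by
  induction l generalizing q720 q1080 q4k na with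
  | nil => simp
  | cons res l ih =>
    simp only [List.foldl_cons, List.map_cons]
    by_cases h0 : PySem.Str.isIn "480p" ((PySem.Dict.mk res).getD "title" "") = true
    · have ht : pvTagB res =
          ((((PySem.Dict.mk res).insert "qualityTitle"
              ("[B][COLOR orange]480p - [/COLOR][/B]" ++ (PySem.Dict.mk res).getD "title" "")).insert
              "Quality" "480p").items, 2) := by
        simp [pvTagB, tag_480 _ _ h0]
      simp only [h0, if_true]
      rw [ih]
      simp [ht]
    · simp only [Bool.not_eq_true] at h0
      by_cases h1 : PySem.Str.isIn "720p" ((PySem.Dict.mk res).getD "title" "") = true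
      · have ht : pvTagB res =
            ((((PySem.Dict.mk res).insert "qualityTitle"
                ("[B][COLOR orange]720p - [/COLOR][/B]" ++ (PySem.Dict.mk res).getD "title" "")).insert
                "Quality" "720p").items, 2) := by
          simp [pvTagB, tag_720 _ _ h0 h1]
        simp only [h0, h1, if_true, Bool.false_eq_true, if_false]
        rw [ih]
        simp [ht]
      · simp only [Bool.not_eq_true] at h1
        by_cases h2 : PySem.Str.isIn "1080p" ((PySem.Dict.mk res).getD "title" "") = true
        · have ht : pvTagB res =
              ((((PySem.Dict.mk res).insert "qualityTitle"
                  ("[B][COLOR blue]1080p - [/COLOR][/B]" ++ (PySem.Dict.mk res).getD "title" "")).insert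
                  "Quality" "1080p").items, 1) := by
            simp [pvTagB, tag_1080 _ _ h0 h1 h2]
          simp only [h0, h1, h2, if_true, Bool.false_eq_true, if_false]
          rw [ih]
          simp [ht]
        · simp only [Bool.not_eq_true] at h2
          by_cases h3 : PySem.Str.isIn "2160" ((PySem.Dict.mk res).getD "title" "") = true
          · have ht : pvTagB res =
                ((((PySem.Dict.mk res).insert "qualityTitle"
                    ("[B][COLOR yellow]4k - [/COLOR][/B]" ++ (PySem.Dict.mk res).getD "title" "")).insert
                    "Quality" "4k").items, 0) := by
              simp [pvTagB, tag_2160 _ _ h0 h1 h2 h3]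
            simp only [h0, h1, h2, h3, if_true, Bool.false_eq_true, if_false]
            rw [ih]
            simp [ht]
          · simp only [Bool.not_eq_true] at h3
            have ht : pvTagB res =
                ((((PySem.Dict.mk res).insert "qualityTitle"
                    ("[B][COLOR yellow]N/A - [/COLOR][/B]" ++ (PySem.Dict.mk res).getD "title" "")).insert
                    "Quality" "N/A").items, 3) := by
              simp [pvTagB, tag_na _ _ h0 h1 h2 h3]
            simp only [h0, h1, h2, h3, Bool.false_eq_true, if_false]
            rw [ih]
            simp [ht]

theorem insertBy_append_not_before {α : Type} (before : α → α → Bool) (x : α)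
    (A B : List α) (hA : ∀ a ∈ A, before x a = false) :
    PySem.List.insertBy before x (A ++ B) = A ++ PySem.List.insertBy before x B := by
  induction A with
  | nil => simp
  | cons a A ih =>
    have ha : before x a = false := hA a (by simp)
    simp only [List.cons_append, PySem.List.insertBy, ha, Bool.false_eq_true, if_false]
    rw [ih (fun a ha' => hA a (by simp [ha']))]

theorem insertBy_all_before {α : Type} (before : α → α → Bool) (x : α)
    (B : List α) (hB : ∀ a ∈ B, before x a = true) :
    PySem.List.insertBy before x B = x :: B := by
  cases B with
  | nil => rfl
  | cons b B => simp [PySem.List.insertBy, hB b (by simp)]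

-- a stable sort by a rank bounded by 3 is the concatenation of the four rank filters
theorem sorted_rank4 {α : Type} (l : List (α × Nat)) (h : ∀ p ∈ l, p.2 ≤ 3) :
    PySem.List.sorted l (fun p => p.2) false =
      l.filter (fun p => p.2 == 0) ++ l.filter (fun p => p.2 == 1) ++
      l.filter (fun p => p.2 == 2) ++ l.filter (fun p => p.2 == 3) := by
  induction l using List.reverseRecOn with
  | nil => rfl
  | append_singleton l x ih =>
    have hl : ∀ p ∈ l, p.2 ≤ 3 := fun p hp => h p (by simp [hp])
    have hx : x.2 ≤ 3 := h x (by simp)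
    have hsort : PySem.List.sorted (l ++ [x]) (fun p => p.2) false =
        PySem.List.insertBy (fun a b => decide (a.2 < b.2)) x
          (PySem.List.sorted l (fun p => p.2) false) := by
      simp [PySem.List.sorted, List.foldl_append]
    rw [hsort, ih hl]
    have mem_filter_rank : ∀ (k : Nat) (p : α × Nat),
        p ∈ l.filter (fun p => p.2 == k) → p.2 = k := by
      intro k p hp
      have := List.of_mem_filter hp
      simpa using this
    have skip : ∀ (k : Nat) (B : List (α × Nat)), x.2 ≥ k →
        PySem.List.insertBy (fun a b => decide (a.2 < b.2)) x (l.filter (fun p => p.2 == k) ++ B) =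
          l.filter (fun p => p.2 == k) ++ PySem.List.insertBy (fun a b => decide (a.2 < b.2)) x B := by
      intro k B hk
      exact insertBy_append_not_before _ _ _ _
        (fun a ha => by
          have := mem_filter_rank k a ha
          simp [this]; omega)
    interval_cases hr : x.2
    · simp only [List.append_assoc]
      rw [skip 0 _ (by omega)]
      rw [insertBy_all_before _ _ _
            (fun a ha => by
              rcases List.mem_append.mp ha with ha | ha
              · simp [mem_filter_rank 1 a ha, hr]
              · rcases List.mem_append.mp ha with ha | ha
                · simp [mem_filter_rank 2 a ha, hr]
                · simp [mem_filter_rank 3 a ha, hr])]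
      simp [List.filter_append, hr]
    · simp only [List.append_assoc]
      rw [skip 0 _ (by omega), skip 1 _ (by omega)]
      rw [insertBy_all_before _ _ _
            (fun a ha => by
              rcases List.mem_append.mp ha with ha | ha
              · simp [mem_filter_rank 2 a ha, hr]
              · simp [mem_filter_rank 3 a ha, hr])]
      simp [List.filter_append, hr]
    · simp only [List.append_assoc]
      rw [skip 0 _ (by omega), skip 1 _ (by omega), skip 2 _ (by omega)]
      rw [insertBy_all_before _ _ _ (fun a ha => by simp [mem_filter_rank 3 a ha, hr])]
      simp [List.filter_append, hr]
    · simp only [List.append_assoc]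
      rw [skip 0 _ (by omega), skip 1 _ (by omega), skip 2 _ (by omega)]
      rw [PySem.List.insertBy_of_forall_not_before _ _ _
            (fun a ha => by simp [mem_filter_rank 3 a ha, hr])]
      simp [List.filter_append, hr]

-- ===== VERDICT (by name: the statement is the Claim_ definition above) =====
theorem filter_by_quality_spec : Claim_equal_filter_by_quality := by
  intro results _ _
  unfold Spec_filter_by_quality filter_by_quality filter_by_quality_alt
  rw [loopA]
  have hs := sorted_rank4 (results.map pvTagB)
    (fun p hp => by
      rcases List.mem_map.mp hp with ⟨res, _, rfl⟩
      exact rank_le_three res)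
  simp [hs, List.map_append]
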